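-- pv_equiv track=rewrite | github.com/TousakaNagio/EECP_onlinejudge | MapCartesianToSpiral.py | solution
-- ===== SOURCE A (Python) =====
-- def solution(X, Y):
--     if X==0 and Y==0:
--         return 0
--     x = 0
--     y = 0
--     count = 0
--     if X==Y and X<0:
--         count = 2*to_it(X)
--         return count
--     elif X<0 and abs(X)>=abs(Y):
--         x = X
--         y = x
--         count = 2*to_it(x)
--         a = -x*2
--         for i in range(a):
--             y += 1
--             count += 1
--             if x==X and y==Y:
--                 return count
--     elif abs(Y)<abs(X):
--         x = -(abs(X)-1)
--         y = x
--         count = to_it(x)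
--     elif abs(Y)>=abs(X):
--         y = -(abs(Y)-1)
--         x = y
--         count = to_it(y)
--
--     count = count * 2
--     a = -x*2+1
--     b = -x*2+2
--     for i in range(a):
--         y += 1
--         count += 1
--         if x==X and y==Y:
--             return count
--     for i in range(a):
--         x += 1
--         count += 1
--         if x==X and y==Y:
--             return count
--     for i in range(b):
--         y -= 1
--         count += 1
--         if x==X and y==Y:
--             return count
--     for i in range(b):
--         x -= 1
--         count += 1
--         if x==X and y==Y:
--             return count
--     return count
--     pass
--
-- def to_it(A):
--     A = (-A)*2
--     return int((A+1)*A/2)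
--     pass
-- ===== SOURCE B (Python) =====
-- def solution(X, Y):
--     m = max(abs(X), abs(Y))
--     if m == 0:
--         return 0
--     base = (2 * m - 1) ** 2
--     if Y == m and X > -m:
--         off = X + m - 1
--     elif X == m:
--         off = 3 * m - 1 - Y
--     elif Y == -m:
--         off = 5 * m - 1 - X
--     else:
--         off = 7 * m - 1 + Y
--     return base + off
-- ===== Notes on version B (the rewrite author's own statement) =====
-- stated objective: faster
-- what changed: Replaces A's step-by-step spiral walk (four early-return loops plus a float-seeded triangular-number helper) with a closed-form computation: ring m = max(|X|,|Y|), base (2m-1)^2, and an arithmetic offset along the ring segment containing (X,Y).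
-- intended difference: On inputs whose float seed s*(2s+1) (s = -X on A's X<0,|X|>=|Y| branches, s = max(|X|,|Y|)-1 otherwise) exceeds 2^53 and is not exactly representable as a double, A's to_it (float true division) perturbs the seed and A returns a spiral index off by twice that nonzero perturbation (e.g. A(-67108865,-67108865) = 18014399180570632); B returns the exact spiral index (18014399180570630), the intended value. — e.g. on solution(-67108865, -67108865): A returns 18014399180570632, B returns 18014399180570630
import Mathlib
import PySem

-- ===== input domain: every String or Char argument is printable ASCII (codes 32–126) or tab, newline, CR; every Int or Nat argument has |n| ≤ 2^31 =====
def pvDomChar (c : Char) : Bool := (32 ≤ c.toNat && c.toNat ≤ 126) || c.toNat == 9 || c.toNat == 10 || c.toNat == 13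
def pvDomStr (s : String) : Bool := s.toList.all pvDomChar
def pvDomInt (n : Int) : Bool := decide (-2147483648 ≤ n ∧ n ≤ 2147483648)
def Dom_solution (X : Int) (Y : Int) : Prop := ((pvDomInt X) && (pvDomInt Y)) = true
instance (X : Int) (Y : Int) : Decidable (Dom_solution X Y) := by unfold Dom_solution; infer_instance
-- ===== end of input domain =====

-- B replaces A's O(max(|X|,|Y|)) spiral walk by an O(1) closed-form ring/offset computation;
-- where A's float-based to_it seed is inexact (see D_ below) B returns the exact spiral index.


-- ===== PORT A =====

-- nearest IEEE-754 double (ties to even) of a nonnegative integer, as an integer; identity below 2^53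
def roundNat (n : Nat) : Nat :=
  if n ≤ 2 ^ 53 then n
  else
    let k := Nat.log2 n - 52
    let q := n / 2 ^ k
    let r := n % 2 ^ k
    let q' := if 2 * r < 2 ^ k then q
              else if 2 ^ k < 2 * r then q + 1
              else if q % 2 = 0 then q else q + 1
    q' * 2 ^ k

def roundDouble (n : Int) : Int :=
  if n < 0 then -(roundNat (-n).toNat : Nat) else (roundNat n.toNat : Nat)

-- models Python's `int(N/2)` exactly as to_it applies it: every call passes N = (A2+1)*A2 with
-- A2 even, so N/2 is an integer; float true division returns the correctly rounded double of
-- that integer and int() of an integral double is itself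
def pyIntHalf (N : Int) : Int := roundDouble (N / 2)

def to_it (A : Int) : Int :=
  let A2 := (-A) * 2
  pyIntHalf ((A2 + 1) * A2)

-- one Python `for i in range(n): v += step; count += 1; if <g> and v == t: return count` loop;
-- g is the conjunct that is constant inside the loop; .inl = early return, .inr = fall-through state
def scan (g : Bool) (t : Int) (step : Int) : Nat → Int → Int → Sum Int (Int × Int)
  | 0, v, c => .inr (v, c)
  | n + 1, v, c =>
    let v' := v + step
    let c' := c + 1
    if g = true ∧ v' = t then .inl c' else scan g t step n v' c'

-- shared suffix of A: `count = count*2`, a = -x*2+1, b = -x*2+2 and the four spiral loops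
def tailA (X Y x y count : Int) : Int :=
  Sum.elim (fun r => r) (fun yc =>
    Sum.elim (fun r => r) (fun xc =>
      Sum.elim (fun r => r) (fun yc2 =>
        Sum.elim (fun r => r) (fun xc2 => xc2.2)
          (scan (yc2.1 == Y) X (-1) (-x * 2 + 2).toNat xc.1 yc2.2))
        (scan (xc.1 == X) Y (-1) (-x * 2 + 2).toNat yc.1 xc.2))
      (scan (yc.1 == Y) X 1 (-x * 2 + 1).toNat x yc.2))
    (scan (x == X) Y 1 (-x * 2 + 1).toNat y (count * 2))

def solution (X : Int) (Y : Int) : Int :=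
  if X = 0 ∧ Y = 0 then 0
  else if X = Y ∧ X < 0 then 2 * to_it X
  else if X < 0 ∧ |Y| ≤ |X| then
    Sum.elim (fun r => r) (fun yc => tailA X Y X yc.1 yc.2)
      (scan (X == X) Y 1 (-X * 2).toNat X (2 * to_it X))
  else if |Y| < |X| then
    tailA X Y (-(|X| - 1)) (-(|X| - 1)) (to_it (-(|X| - 1)))
  else if |X| ≤ |Y| then
    tailA X Y (-(|Y| - 1)) (-(|Y| - 1)) (to_it (-(|Y| - 1)))
  else tailA X Y 0 0 0

-- ===== PORT B =====
def solution_alt (X : Int) (Y : Int) : Int :=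
  let m := max |X| |Y|
  if m = 0 then 0
  else
    let base := (2 * m - 1) ^ 2
    let off :=
      if Y = m ∧ -m < X then X + m - 1
      else if X = m then 3 * m - 1 - Y
      else if Y = -m then 5 * m - 1 - X
      else 7 * m - 1 + Y
    base + off

-- ===== PRECONDITION & SPEC =====
-- On inputs where A's float seed s*(2s+1) is not exactly representable as an IEEE-754 double
-- (s = -X on A's `X<0, |X|>=|Y|` branches, max(|X|,|Y|)-1 on the others), A's to_it (float true
-- division) perturbs the seed and A's spiral index is off by twice that nonzero perturbation;
-- B returns the exact spiral index, the intended value.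
def D_solution (X : Int) (Y : Int) : Prop :=
  let s := max X.natAbs Y.natAbs - if Y.natAbs < (1 - X).toNat then 0 else 1
  let M := s * (2 * s + 1)
  M % 2 ^ (M.log2 - 52) ≠ 0
instance (X : Int) (Y : Int) : Decidable (D_solution X Y) := by unfold D_solution; infer_instance

def Spec_solution (X : Int) (Y : Int) (out : Int) : Prop := ¬ D_solution X Y → out = solution_alt X Y
instance (X : Int) (Y : Int) (out : Int) : Decidable (Spec_solution X Y out) := by unfold Spec_solution; infer_instance

def pvDiffWitness_solution : Int × Int := (-67108865, -67108865)
def pvDiffWitnessOut_solution : Int × Int := (18014399180570632, 18014399180570630)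

-- ===== CLAIM (what is proved, stated in full; the proofs are below) =====
def Claim_unchanged_solution : Prop := ∀ (X : Int) (Y : Int), Dom_solution X Y → Spec_solution X Y (solution X Y)
def Claim_changed_solution : Prop := Dom_solution (pvDiffWitness_solution.1) (pvDiffWitness_solution.2) ∧ D_solution (pvDiffWitness_solution.1) (pvDiffWitness_solution.2) ∧ solution (pvDiffWitness_solution.1) (pvDiffWitness_solution.2) = pvDiffWitnessOut_solution.1 ∧ solution_alt (pvDiffWitness_solution.1) (pvDiffWitness_solution.2) = pvDiffWitnessOut_solution.2 ∧ pvDiffWitnessOut_solution.1 ≠ pvDiffWitnessOut_solution.2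
def Claim_exact_solution : Prop := ∀ (X : Int) (Y : Int), Dom_solution X Y → D_solution X Y → solution X Y ≠ solution_alt X Y

-- ===== LEMMAS AND PROOFS =====

-- proof-side helpers: the seed A feeds through float division, and inexact representability
def pvSeed (X : Int) (Y : Int) : Int :=
  if X + (max X.natAbs Y.natAbs : Int) = 0 then -X else (max X.natAbs Y.natAbs : Int) - 1

def pvInexact (M : Int) : Prop := M % ((2 : Int) ^ (Nat.log2 M.toNat - 52)) ≠ 0

theorem D_iff (X Y : Int) :
    D_solution X Y ↔ pvInexact (pvSeed X Y * (2 * pvSeed X Y + 1)) := by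
  simp only [D_solution, pvSeed, pvInexact]
  have hs : ((max X.natAbs Y.natAbs - if Y.natAbs < (1 - X).toNat then 0 else 1 : Nat) : Int)
      = (if X + (max X.natAbs Y.natAbs : Int) = 0 then -X else (max X.natAbs Y.natAbs : Int) - 1) := by
    split_ifs <;> omega
  rw [← hs]
  have hM : (((max X.natAbs Y.natAbs - if Y.natAbs < (1 - X).toNat then 0 else 1 : Nat) : Int)
        * (2 * ((max X.natAbs Y.natAbs - if Y.natAbs < (1 - X).toNat then 0 else 1 : Nat) : Int) + 1))
      = (((max X.natAbs Y.natAbs - if Y.natAbs < (1 - X).toNat then 0 else 1)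
          * (2 * (max X.natAbs Y.natAbs - if Y.natAbs < (1 - X).toNat then 0 else 1) + 1) : Nat) : Int) := by
    push_cast
    ring
  rw [hM, Int.toNat_natCast]
  constructor
  · intro h hc
    exact h (by exact_mod_cast hc)
  · intro h hc
    exact h (by exact_mod_cast hc)

theorem mod_pow_log_eq_zero_of_le (n : Nat) (h : n ≤ 2 ^ 53) :
    n % 2 ^ (Nat.log2 n - 52) = 0 := by
  by_cases h0 : n = 0
  · simp [h0]
  · have h1 := Nat.log2_self_le h0
    have h2 : Nat.log2 n ≤ 53 := by
      by_contra hh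
      have : (2 : Nat) ^ 54 ≤ 2 ^ Nat.log2 n := Nat.pow_le_pow_right (by norm_num) (by omega)
      omega
    rcases (by omega : Nat.log2 n ≤ 52 ∨ Nat.log2 n = 53) with hc | hc
    · have : Nat.log2 n - 52 = 0 := by omega
      rw [this]
      omega
    · have hn : n = 2 ^ 53 := by rw [hc] at h1; omega
      rw [hc, hn]
      norm_num


theorem roundNat_eq_self_iff (n : Nat) :
    roundNat n = n ↔ n % 2 ^ (Nat.log2 n - 52) = 0 := by
  simp only [roundNat]
  by_cases h : n ≤ 2 ^ 53
  · rw [if_pos h]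
    exact iff_of_true rfl (mod_pow_log_eq_zero_of_le n h)
  · rw [if_neg h]
    have hp : 0 < 2 ^ (Nat.log2 n - 52) := by positivity
    have hdm := Nat.div_add_mod n (2 ^ (Nat.log2 n - 52))
    have hrlt : n % 2 ^ (Nat.log2 n - 52) < 2 ^ (Nat.log2 n - 52) := Nat.mod_lt _ hp
    by_cases hr : n % 2 ^ (Nat.log2 n - 52) = 0
    · rw [hr, if_pos (by omega)]
      exact iff_of_true (Nat.div_mul_cancel (Nat.dvd_of_mod_eq_zero hr)) rfl
    · have h1 : n / 2 ^ (Nat.log2 n - 52) * 2 ^ (Nat.log2 n - 52) ≠ n := by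
        rw [Nat.mul_comm]; intro heq; omega
      have h2 : (n / 2 ^ (Nat.log2 n - 52) + 1) * 2 ^ (Nat.log2 n - 52) ≠ n := by
        have hx : (n / 2 ^ (Nat.log2 n - 52) + 1) * 2 ^ (Nat.log2 n - 52)
            = 2 ^ (Nat.log2 n - 52) * (n / 2 ^ (Nat.log2 n - 52)) + 2 ^ (Nat.log2 n - 52) := by
          ring
        rw [hx]; intro heq; omega
      refine iff_of_false ?_ hr
      split_ifs <;> first | exact h1 | exact h2

theorem roundDouble_eq_self_iff (M : Int) (h0 : 0 ≤ M) : roundDouble M = M ↔ ¬ pvInexact M := by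
  obtain ⟨n, rfl⟩ : ∃ n : Nat, M = (n : Int) := ⟨M.toNat, (Int.toNat_of_nonneg h0).symm⟩
  unfold roundDouble pvInexact
  rw [if_neg (by omega)]
  simp only [Int.toNat_natCast, ne_eq, not_not]
  rw [Nat.cast_inj, roundNat_eq_self_iff]
  exact_mod_cast Iff.rfl

theorem to_it_eq_round (x : Int) : to_it x = roundDouble (x * (2 * x - 1)) := by
  have hN : (-x * 2 + 1) * (-x * 2) = 2 * (x * (2 * x - 1)) := by ring
  have hdiv : (2 * (x * (2 * x - 1))) / 2 = x * (2 * x - 1) := by omega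
  simp only [to_it, pyIntHalf, hN, hdiv]

theorem seedM_nonneg (X Y : Int) : 0 ≤ pvSeed X Y * (2 * pvSeed X Y + 1) := by
  have hS : -1 ≤ pvSeed X Y := by
    unfold pvSeed
    split_ifs <;> omega
  rcases (by omega : pvSeed X Y = -1 ∨ 0 ≤ pvSeed X Y) with h | h
  · rw [h]; norm_num
  · nlinarith

theorem scan_up (g : Bool) (t : Int) (n : Nat) (v c : Int) :
    scan g t 1 n v c =
      if g = true ∧ v < t ∧ t ≤ v + (n : Int) then .inl (c + (t - v))
      else .inr (v + (n : Int), c + (n : Int)) := by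
  induction n generalizing v c with
  | zero => rw [if_neg (by push_cast; omega)]; simp [scan]
  | succ n ih =>
    rw [scan, ih]
    by_cases hg : g = true
    · by_cases h1 : v + 1 = t
      · rw [if_pos ⟨hg, h1⟩, if_pos ⟨hg, by omega, by push_cast; omega⟩]
        simp only [Sum.inl.injEq]; omega
      · rw [if_neg (by tauto)]
        by_cases h2 : v + 1 < t ∧ t ≤ v + 1 + (n : Int)
        · rw [if_pos ⟨hg, h2.1, h2.2⟩, if_pos ⟨hg, by omega, by push_cast; omega⟩]
          simp only [Sum.inl.injEq]; omega
        · rw [if_neg (by omega), if_neg (by push_cast; omega)]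
          simp only [Sum.inr.injEq, Prod.mk.injEq]; push_cast; omega
    · rw [if_neg (by tauto), if_neg (by tauto), if_neg (by tauto)]
      simp only [Sum.inr.injEq, Prod.mk.injEq]; push_cast; omega

theorem scan_down (g : Bool) (t : Int) (n : Nat) (v c : Int) :
    scan g t (-1) n v c =
      if g = true ∧ v - (n : Int) ≤ t ∧ t < v then .inl (c + (v - t))
      else .inr (v - (n : Int), c + (n : Int)) := by
  induction n generalizing v c with
  | zero => rw [if_neg (by push_cast; omega)]; simp [scan]
  | succ n ih =>
    rw [scan, ih]
    by_cases hg : g = true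
    · by_cases h1 : v + -1 = t
      · rw [if_pos ⟨hg, h1⟩, if_pos ⟨hg, by push_cast; omega, by omega⟩]
        simp only [Sum.inl.injEq]; omega
      · rw [if_neg (by tauto)]
        by_cases h2 : v + -1 - (n : Int) ≤ t ∧ t < v + -1
        · rw [if_pos ⟨hg, h2.1, h2.2⟩, if_pos ⟨hg, by push_cast; omega, by omega⟩]
          simp only [Sum.inl.injEq]; omega
        · rw [if_neg (by omega), if_neg (by push_cast; omega)]
          simp only [Sum.inr.injEq, Prod.mk.injEq]; push_cast; omega
    · rw [if_neg (by tauto), if_neg (by tauto), if_neg (by tauto)]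
      simp only [Sum.inr.injEq, Prod.mk.injEq]; push_cast; omega

theorem tail_closed (X Y m c : Int) (hm1 : 1 ≤ m)
    (hmX : -m ≤ X ∧ X ≤ m) (hmY : -m ≤ Y ∧ Y ≤ m)
    (hat : X = m ∨ X = -m ∨ Y = m ∨ Y = -m)
    (hM : max |X| |Y| = m) (hnb : X < 0 → Y < X ∨ -X < Y) :
    tailA X Y (-(m - 1)) (-(m - 1)) c
      = solution_alt X Y + 2 * (c - (m - 1) * (2 * m - 1)) := by
  have hbase : (2 * m - 1) ^ 2 = 2 * ((m - 1) * (2 * m - 1)) + (2 * m - 1) := by ring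
  have hcast1 : ((( -(-(m - 1)) * 2 + 1).toNat) : Int) = (m - 1) * 2 + 1 := by
    rw [Int.toNat_of_nonneg (by omega)]; ring
  have hcast2 : ((( -(-(m - 1)) * 2 + 2).toNat) : Int) = (m - 1) * 2 + 2 := by
    rw [Int.toNat_of_nonneg (by omega)]; ring
  simp only [tailA]
  rw [scan_up, hcast1]
  simp only [beq_iff_eq]
  split_ifs with h1
  · -- early return in loop 1 (up the left inner column onto the ring start)
    simp only [Sum.elim_inl, solution_alt]
    rw [hM, if_neg (by omega), hbase]
    clear hM
    generalize (m - 1) * (2 * m - 1) = t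
    split_ifs <;> omega
  · simp only [Sum.elim_inr]
    rw [scan_up, hcast1]
    simp only [beq_iff_eq]
    split_ifs with h2
    · -- early return in loop 2 (rightwards along the top edge)
      simp only [Sum.elim_inl, solution_alt]
      rw [hM, if_neg (by omega), hbase]
      clear hM
      generalize (m - 1) * (2 * m - 1) = t
      split_ifs <;> omega
    · simp only [Sum.elim_inr]
      rw [scan_down, hcast2]
      simp only [beq_iff_eq]
      split_ifs with h3
      · -- early return in loop 3 (down the right edge)
        simp only [Sum.elim_inl, solution_alt]
        rw [hM, if_neg (by omega), hbase]
        clear hM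
        generalize (m - 1) * (2 * m - 1) = t
        split_ifs <;> omega
      · simp only [Sum.elim_inr]
        rw [scan_down, hcast2]
        simp only [beq_iff_eq]
        split_ifs with h4
        · -- early return in loop 4 (leftwards along the bottom edge)
          simp only [Sum.elim_inl, solution_alt]
          rw [hM, if_neg (by omega), hbase]
          clear hM
          generalize (m - 1) * (2 * m - 1) = t
          split_ifs <;> omega
        · -- fall-through: impossible, every admissible target is hit in some loop
          exfalso
          clear hM
          omega

-- A's value is B's value plus twice the (possibly zero) float perturbation of the seed
theorem solution_decomp (X Y : Int) :
    solution X Y = solution_alt X Y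
      + 2 * (roundDouble (pvSeed X Y * (2 * pvSeed X Y + 1)) - pvSeed X Y * (2 * pvSeed X Y + 1)) := by
  simp only [solution]
  by_cases h00 : X = 0 ∧ Y = 0
  · rw [if_pos h00]
    obtain ⟨hX0, hY0⟩ := h00
    subst hX0; subst hY0
    decide
  · rw [if_neg h00]
    by_cases hdg : X = Y ∧ X < 0
    · rw [if_pos hdg]
      obtain ⟨hXY, hXn⟩ := hdg
      subst hXY
      have hseed : pvSeed X X = -X := by
        unfold pvSeed; rw [if_pos (by omega)]
      rw [hseed]
      have hMr : -X * (2 * -X + 1) = X * (2 * X - 1) := by ring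
      rw [hMr, to_it_eq_round X]
      have haX : |X| = -X := abs_of_neg hXn
      have hM : max |X| |X| = -X := by rw [max_self, haX]
      simp only [solution_alt]
      rw [hM, if_neg (by omega)]
      have hb2 : (2 * -X - 1) ^ 2 = 2 * (X * (2 * X - 1)) + 6 * X + 1 := by ring
      rw [hb2]
      generalize X * (2 * X - 1) = t
      generalize roundDouble t = r
      split_ifs <;> omega
    · rw [if_neg hdg]
      by_cases hbr1 : X < 0 ∧ |Y| ≤ |X|
      · rw [if_pos hbr1]
        obtain ⟨hXn, hYX⟩ := hbr1
        have haX : |X| = -X := abs_of_neg hXn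
        have hM : max |X| |Y| = -X := by rw [max_eq_left hYX, haX]
        have hne : X ≠ Y := fun h => hdg ⟨h, hXn⟩
        have hYX' := hYX
        simp only [Int.abs_eq_natAbs] at hYX'
        have hseed : pvSeed X Y = -X := by
          unfold pvSeed; rw [if_pos (by omega)]
        rw [hseed]
        have hMr : -X * (2 * -X + 1) = X * (2 * X - 1) := by ring
        rw [hMr, to_it_eq_round X]
        rw [scan_up]
        have hc : (((-X * 2).toNat) : Int) = -X * 2 := Int.toNat_of_nonneg (by omega)
        rw [hc]
        rw [if_pos ⟨beq_self_eq_true X, by omega, by omega⟩]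
        simp only [Sum.elim_inl, solution_alt]
        rw [hM, if_neg (by omega)]
        have hb2 : (2 * -X - 1) ^ 2 = 2 * (X * (2 * X - 1)) + 6 * X + 1 := by ring
        rw [hb2]
        generalize X * (2 * X - 1) = t
        generalize roundDouble t = r
        split_ifs <;> omega
      · rw [if_neg hbr1]
        by_cases hYX : |Y| < |X|
        · rw [if_pos hYX]
          have h0Y := abs_nonneg Y
          have hXpos : 0 < X := by
            rcases abs_cases X with ⟨h1, h2⟩ | ⟨h1, h2⟩
            · rcases lt_or_eq_of_le h2 with h | h
              · exact h
              · exfalso; apply h00; constructor <;> [skip; skip] <;> omega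
            · exact absurd ⟨h2, le_of_lt hYX⟩ hbr1
          have haX : |X| = X := abs_of_pos hXpos
          obtain ⟨hy1, hy2⟩ := abs_lt.mp (haX ▸ hYX)
          have hYX' := hYX
          simp only [Int.abs_eq_natAbs] at hYX'
          have hseed : pvSeed X Y = X - 1 := by
            unfold pvSeed
            rw [if_neg (by omega)]
            omega
          rw [hseed, haX]
          have hMr : (X - 1) * (2 * (X - 1) + 1) = (X - 1) * (2 * X - 1) := by ring
          have hMr2 : -(X - 1) * (2 * -(X - 1) - 1) = (X - 1) * (2 * X - 1) := by ring
          rw [to_it_eq_round (-(X - 1)), hMr, hMr2]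
          exact tail_closed X Y X _ (by omega) ⟨by omega, le_rfl⟩
            ⟨by omega, by omega⟩ (Or.inl rfl)
            (by rw [max_eq_left (le_of_lt hYX), haX]) (fun h => absurd h (by omega))
        · rw [if_neg hYX]
          rw [if_pos (not_lt.mp hYX)]
          have hXY2 := not_lt.mp hYX
          obtain ⟨hx1, hx2⟩ := abs_le.mp (le_trans hXY2 (le_refl |Y|))
          have hm1 : 1 ≤ |Y| := by
            rcases eq_or_lt_of_le (abs_nonneg Y) with h | h
            · exfalso
              have hY0 : Y = 0 := abs_eq_zero.mp h.symm
              have hX0 : X = 0 := abs_eq_zero.mp (le_antisymm (by omega) (abs_nonneg X))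
              exact h00 ⟨hX0, hY0⟩
            · omega
          have hnb' : X < 0 → Y < X ∨ -X < Y := by
            intro hXn
            have hlt : |X| < |Y| := by
              rcases lt_or_eq_of_le hXY2 with h | h
              · exact h
              · exact absurd ⟨hXn, le_of_eq h.symm⟩ hbr1
            have haX : |X| = -X := abs_of_neg hXn
            rcases abs_cases Y with ⟨h1, h2⟩ | ⟨h1, h2⟩ <;> omega
          have hXY2' := hXY2
          simp only [Int.abs_eq_natAbs] at hXY2'
          have hbr1' := hbr1
          simp only [Int.abs_eq_natAbs] at hbr1'
          have hseed : pvSeed X Y = |Y| - 1 := by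
            unfold pvSeed
            rw [if_neg (by omega)]
            simp only [Int.abs_eq_natAbs]
            omega
          rw [hseed]
          rcases abs_cases Y with ⟨hy1, hy2⟩ | ⟨hy1, hy2⟩
          · rw [hy1] at hm1 hx1 hx2 hseed ⊢
            have hMr : (Y - 1) * (2 * (Y - 1) + 1) = (Y - 1) * (2 * Y - 1) := by ring
            have hMr2 : -(Y - 1) * (2 * -(Y - 1) - 1) = (Y - 1) * (2 * Y - 1) := by ring
            rw [to_it_eq_round (-(Y - 1)), hMr, hMr2]
            exact tail_closed X Y Y _ hm1 ⟨by omega, by omega⟩ ⟨by omega, le_rfl⟩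
              (Or.inr (Or.inr (Or.inl rfl)))
              (by rw [max_eq_right hXY2, hy1]) hnb'
          · rw [hy1] at hm1 hx1 hx2 hseed ⊢
            have hMr : (-Y - 1) * (2 * (-Y - 1) + 1) = (-Y - 1) * (2 * -Y - 1) := by ring
            have hMr2 : -(-Y - 1) * (2 * -(-Y - 1) - 1) = (-Y - 1) * (2 * -Y - 1) := by ring
            rw [to_it_eq_round (-(-Y - 1)), hMr, hMr2]
            exact tail_closed X Y (-Y) _ hm1 ⟨by omega, by omega⟩ ⟨by omega, by omega⟩
              (Or.inr (Or.inr (Or.inr (by omega))))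
              (by rw [max_eq_right hXY2, hy1]) hnb'

-- ===== VERDICT (by name: the statement is the Claim_ definition above) =====
theorem solution_spec : Claim_unchanged_solution := by
  intro X Y _
  unfold Spec_solution
  intro hD
  rw [D_iff] at hD
  have hr := (roundDouble_eq_self_iff _ (seedM_nonneg X Y)).mpr hD
  rw [solution_decomp X Y, hr]
  ring

theorem solution_changed : Claim_changed_solution := by
  unfold Claim_changed_solution; decide

theorem solution_tight : Claim_exact_solution := by
  unfold Claim_exact_solution
  intro X Y _ hD
  rw [D_iff] at hD
  have hne : roundDouble (pvSeed X Y * (2 * pvSeed X Y + 1)) ≠ pvSeed X Y * (2 * pvSeed X Y + 1) :=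
    fun h => (roundDouble_eq_self_iff _ (seedM_nonneg X Y)).mp h hD
  rw [solution_decomp X Y]
  intro h
  apply hne
  omega
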